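-- pv_equiv track=rewrite | github.com/Ale6100/Asistente-Virtual-Python | scripts/utils.py | eliminar_frases_introductorias
-- ===== SOURCE A (Python) =====
-- def eliminar_frases_introductorias(rec: str, array: list) -> str:
--     frases_a_borrar = [ f'{frase} ' for frase in array ] # Agrega un espacio en cada frase del array
--     frases_a_borrar_ordenadas = sorted(frases_a_borrar, key=lambda x: len(x), reverse=True) # Reordena según la longitud de caracteres, de mayor a menor
--
--     for frase in frases_a_borrar_ordenadas: # Se elimina de rec la primera frase encontrada de la lista
--         if rec.startswith(frase):
--             rec = rec[len(frase):]
--             break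
--     return rec
-- ===== SOURCE B (Python) =====
-- def eliminar_frases_introductorias(rec: str, array: list) -> str:
--     # One pass, no sort: keep the longest matching candidate (first one on ties).
--     best = None
--     for frase in array:
--         cand = frase + ' '
--         if rec.startswith(cand) and (best is None or len(cand) > len(best)):
--             best = cand
--     return rec[len(best):] if best is not None else rec
-- ===== Notes on version B (the rewrite author's own statement) =====
-- stated objective: faster
-- what changed: Replaces building a space-suffixed copy of the list plus a stable sort by descending length and a break-on-first-match scan with a single unsorted pass that keeps the longest matching candidate (strict comparison preserves A's tie-break, which is moot since equal-length matching prefixes are identical).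
import Mathlib
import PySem

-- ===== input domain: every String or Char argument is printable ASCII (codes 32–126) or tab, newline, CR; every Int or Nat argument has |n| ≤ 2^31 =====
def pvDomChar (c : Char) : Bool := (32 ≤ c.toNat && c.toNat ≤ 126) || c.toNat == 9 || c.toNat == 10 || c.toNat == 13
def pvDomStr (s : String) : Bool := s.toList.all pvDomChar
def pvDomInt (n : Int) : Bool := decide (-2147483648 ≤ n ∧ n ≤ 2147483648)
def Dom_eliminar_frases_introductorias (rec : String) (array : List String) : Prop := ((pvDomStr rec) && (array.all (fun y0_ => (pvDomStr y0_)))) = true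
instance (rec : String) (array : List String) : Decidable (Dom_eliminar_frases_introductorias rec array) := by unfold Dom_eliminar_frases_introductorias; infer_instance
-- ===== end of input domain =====

-- B replaces A's sort-by-descending-length + break-on-first-match with one unsorted pass
-- keeping the longest matching candidate (objective: simpler).

-- ===== PORT A =====
-- the 'for … : if rec.startswith(frase): rec = rec[len(frase):]; break' loop
def pvLoopA (rec : String) : List String → String
  | [] => rec
  | frase :: rest =>
    if PySem.Str.startswith rec frase then PySem.Str.slice rec (some (PySem.Str.len frase)) none
    else pvLoopA rec rest

def eliminar_frases_introductorias (rec : String) (array : List String) : String :=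
  let frases_a_borrar := array.map (fun frase => frase ++ " ")
  let frases_a_borrar_ordenadas := PySem.List.sorted frases_a_borrar (fun x => PySem.Str.len x) true
  pvLoopA rec frases_a_borrar_ordenadas

-- ===== PORT B =====
-- one iteration of B's loop: replace best when cand matches rec and is strictly longer
def pvStepB (rec : String) (best : Option String) (frase : String) : Option String :=
  let cand := frase ++ " "
  if PySem.Str.startswith rec cand &&
      (match best with
       | none => true
       | some b => decide (PySem.Str.len b < PySem.Str.len cand)) then some cand else best

def eliminar_frases_introductorias_alt (rec : String) (array : List String) : String :=
  match array.foldl (pvStepB rec) none with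
  | some b => PySem.Str.slice rec (some (PySem.Str.len b)) none
  | none => rec

-- ===== PRECONDITION & SPEC =====
def Spec_eliminar_frases_introductorias (rec : String) (array : List String) (out : String) : Prop := out = eliminar_frases_introductorias_alt rec array
instance (rec : String) (array : List String) (out : String) : Decidable (Spec_eliminar_frases_introductorias rec array out) := by unfold Spec_eliminar_frases_introductorias; infer_instance

-- ===== CLAIM (what is proved, stated in full; the proofs are below) =====
def Claim_equal_eliminar_frases_introductorias : Prop := ∀ (rec : String) (array : List String), Dom_eliminar_frases_introductorias rec array → Spec_eliminar_frases_introductorias rec array (eliminar_frases_introductorias rec array)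

-- ===== LEMMAS AND PROOFS =====

-- A's loop on a length-descending list: either nothing matches, or the result drops a
-- matching phrase of maximal length among all matching elements of the list.
theorem pvLoopA_spec (rec : String) (l : List String)
    (hp : l.Pairwise (fun a b => PySem.Str.len b ≤ PySem.Str.len a)) :
    (pvLoopA rec l = rec ∧ ∀ f ∈ l, PySem.Str.startswith rec f = false) ∨
    (∃ f ∈ l, PySem.Str.startswith rec f = true ∧
      pvLoopA rec l = PySem.Str.slice rec (some (PySem.Str.len f)) none ∧
      ∀ g ∈ l, PySem.Str.startswith rec g = true → PySem.Str.len g ≤ PySem.Str.len f) := by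
  induction l with
  | nil => exact Or.inl ⟨rfl, by simp⟩
  | cons frase rest ih =>
    rcases List.pairwise_cons.mp hp with ⟨hhead, htail⟩
    by_cases h : PySem.Str.startswith rec frase = true
    · refine Or.inr ⟨frase, List.mem_cons_self, h, ?_, ?_⟩
      · show (if PySem.Str.startswith rec frase = true then
            PySem.Str.slice rec (some (PySem.Str.len frase)) none else pvLoopA rec rest) = _
        rw [if_pos h]
      · intro g hg _
        rcases List.mem_cons.mp hg with rfl | hg'
        · exact le_refl _
        · exact hhead g hg'
    · have heq : pvLoopA rec (frase :: rest) = pvLoopA rec rest := by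
        show (if PySem.Str.startswith rec frase = true then
            PySem.Str.slice rec (some (PySem.Str.len frase)) none else pvLoopA rec rest) = _
        rw [if_neg h]
      have h' : PySem.Str.startswith rec frase = false := Bool.not_eq_true _ |>.mp h
      rcases ih htail with ⟨h1, h2⟩ | ⟨f, hf, hpf, hres, hmax⟩
      · refine Or.inl ⟨heq.trans h1, ?_⟩
        intro g hg
        rcases List.mem_cons.mp hg with rfl | hg'
        · exact h'
        · exact h2 g hg'
      · refine Or.inr ⟨f, List.mem_cons_of_mem _ hf, hpf, heq.trans hres, ?_⟩
        intro g hg hpg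
        rcases List.mem_cons.mp hg with rfl | hg'
        · exact absurd hpg (by rw [h']; exact Bool.false_ne_true)
        · exact hmax g hg' hpg

-- one step of B's loop does exactly one of three things
theorem pvStepB_cases (rec frase : String) (acc : Option String) :
    (PySem.Str.startswith rec (frase ++ " ") = false ∧ pvStepB rec acc frase = acc) ∨
    (PySem.Str.startswith rec (frase ++ " ") = true ∧ pvStepB rec acc frase = some (frase ++ " ") ∧
       ∀ c, acc = some c → PySem.Str.len c < PySem.Str.len (frase ++ " ")) ∨
    (PySem.Str.startswith rec (frase ++ " ") = true ∧ pvStepB rec acc frase = acc ∧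
       ∃ c, acc = some c ∧ PySem.Str.len (frase ++ " ") ≤ PySem.Str.len c) := by
  cases hp : PySem.Str.startswith rec (frase ++ " ") with
  | false =>
    refine Or.inl ⟨rfl, ?_⟩
    unfold pvStepB
    cases acc <;> simp only [hp, Bool.false_and, Bool.false_eq_true, if_false]
  | true =>
    cases acc with
    | none =>
      refine Or.inr (Or.inl ⟨rfl, ?_, by intro c hc; cases hc⟩)
      unfold pvStepB
      simp only [hp, Bool.true_and, if_true]
    | some c =>
      by_cases hl : PySem.Str.len c < PySem.Str.len (frase ++ " ")
      · refine Or.inr (Or.inl ⟨rfl, ?_, ?_⟩)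
        · unfold pvStepB
          simp only [hp, Bool.true_and, decide_eq_true hl, if_true]
        · intro c' hc'; injection hc' with e; rw [← e]; exact hl
      · refine Or.inr (Or.inr ⟨rfl, ?_, c, rfl, by omega⟩)
        unfold pvStepB
        simp only [hp, Bool.true_and, decide_eq_false hl, Bool.false_eq_true, if_false]

-- B's fold invariant: the accumulator stays none iff nothing matched so far, and when
-- some b, b matches rec, came from the candidates or the initial accumulator, and its
-- length dominates every matching candidate seen and the initial accumulator.
theorem pvFoldB_spec (rec : String) (l : List String) (acc : Option String)
    (hacc : ∀ c, acc = some c → PySem.Str.startswith rec c = true) :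
    (l.foldl (pvStepB rec) acc = none → acc = none ∧
        ∀ f ∈ l, PySem.Str.startswith rec (f ++ " ") = false) ∧
    (∀ b, l.foldl (pvStepB rec) acc = some b →
        PySem.Str.startswith rec b = true ∧
        (acc = some b ∨ b ∈ l.map (fun f => f ++ " ")) ∧
        (∀ f ∈ l, PySem.Str.startswith rec (f ++ " ") = true →
            PySem.Str.len (f ++ " ") ≤ PySem.Str.len b) ∧
        (∀ c, acc = some c → PySem.Str.len c ≤ PySem.Str.len b)) := by
  induction l generalizing acc with
  | nil =>
    refine ⟨fun h => ⟨h, by simp⟩, fun b h => ?_⟩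
    simp only [List.foldl_nil] at h
    exact ⟨hacc b h, Or.inl h, by simp,
      fun c hc => by rw [h] at hc; injection hc with e; rw [e]⟩
  | cons frase rest ih =>
    simp only [List.foldl_cons]
    rcases pvStepB_cases rec frase acc with ⟨hp, hstep⟩ | ⟨hp, hstep, hlt⟩ | ⟨hp, hstep, c0, hc0, hle⟩
    · -- candidate does not match: accumulator unchanged
      rw [hstep]
      rcases ih acc hacc with ⟨hnone, hsome⟩
      refine ⟨fun h => ?_, fun b h => ?_⟩
      · rcases hnone h with ⟨ha, hrest⟩
        refine ⟨ha, fun f hf => ?_⟩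
        rcases List.mem_cons.mp hf with rfl | hf'
        · exact hp
        · exact hrest f hf'
      · rcases hsome b h with ⟨hpb, hmem, hmax, hdom⟩
        refine ⟨hpb, ?_, fun f hf hpf => ?_, hdom⟩
        · rcases hmem with ha | hin
          · exact Or.inl ha
          · exact Or.inr (List.mem_map.mpr (by
              rcases List.mem_map.mp hin with ⟨g, hg, he⟩
              exact ⟨g, List.mem_cons_of_mem _ hg, he⟩))
        · rcases List.mem_cons.mp hf with rfl | hf'
          · exact absurd hpf (by rw [hp]; exact Bool.false_ne_true)
          · exact hmax f hf' hpf
    · -- candidate matches and replaces the accumulator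
      rw [hstep]
      have hacc' : ∀ c, (some (frase ++ " ") : Option String) = some c →
          PySem.Str.startswith rec c = true := by
        intro c hc; injection hc with e; rw [← e]; exact hp
      rcases ih (some (frase ++ " ")) hacc' with ⟨hnone, hsome⟩
      refine ⟨fun h => absurd (hnone h).1 (by simp), fun b h => ?_⟩
      rcases hsome b h with ⟨hpb, hmem, hmax, hdom⟩
      have hcb : PySem.Str.len (frase ++ " ") ≤ PySem.Str.len b := hdom _ rfl
      refine ⟨hpb, ?_, fun f hf hpf => ?_, fun c hc => ?_⟩
      · rcases hmem with ha | hin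
        · injection ha with e
          exact Or.inr (List.mem_map.mpr ⟨frase, List.mem_cons_self, e⟩)
        · exact Or.inr (List.mem_map.mpr (by
            rcases List.mem_map.mp hin with ⟨g, hg, he⟩
            exact ⟨g, List.mem_cons_of_mem _ hg, he⟩))
      · rcases List.mem_cons.mp hf with rfl | hf'
        · exact hcb
        · exact hmax f hf' hpf
      · exact le_of_lt (lt_of_lt_of_le (hlt c hc) hcb)
    · -- candidate matches but the accumulator is at least as long: unchanged
      rw [hstep]
      rcases ih acc hacc with ⟨hnone, hsome⟩
      refine ⟨fun h => absurd ((hnone h).1.symm.trans hc0) (by simp), fun b h => ?_⟩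
      rcases hsome b h with ⟨hpb, hmem, hmax, hdom⟩
      refine ⟨hpb, ?_, fun f hf hpf => ?_, hdom⟩
      · rcases hmem with ha | hin
        · exact Or.inl ha
        · exact Or.inr (List.mem_map.mpr (by
            rcases List.mem_map.mp hin with ⟨g, hg, he⟩
            exact ⟨g, List.mem_cons_of_mem _ hg, he⟩))
      · rcases List.mem_cons.mp hf with rfl | hf'
        · exact le_trans hle (hdom c0 hc0)
        · exact hmax f hf' hpf

-- ===== VERDICT (by name: the statement is the Claim_ definition above) =====
theorem eliminar_frases_introductorias_spec : Claim_equal_eliminar_frases_introductorias := by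
  intro rec array _
  unfold Spec_eliminar_frases_introductorias
  unfold eliminar_frases_introductorias eliminar_frases_introductorias_alt
  set cands := array.map (fun frase => frase ++ " ") with hcands
  set s := PySem.List.sorted cands (fun x => PySem.Str.len x) true with hs
  have hpw : s.Pairwise (fun a b => PySem.Str.len b ≤ PySem.Str.len a) :=
    PySem.List.sorted_pairwise_rev cands (fun x => PySem.Str.len x)
  have hmem : ∀ x, x ∈ s ↔ x ∈ cands := fun x =>
    PySem.List.mem_sorted cands (fun y => PySem.Str.len y) true x
  rcases pvFoldB_spec rec array none (by intro c hc; cases hc) with ⟨hBnone, hBsome⟩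
  rcases pvLoopA_spec rec s hpw with ⟨hA, hnoA⟩ | ⟨f, hf, hpf, hAres, hAmax⟩
  · -- nothing matches: B's fold must be none
    rcases hcase : array.foldl (pvStepB rec) none with _ | b
    · rw [hA]
    · exfalso
      rcases hBsome b hcase with ⟨hpb, hmemb, _, _⟩
      rcases hmemb with h | h
      · cases h
      · have hbs : b ∈ s := (hmem b).mpr h
        rw [hnoA b hbs] at hpb
        exact Bool.false_ne_true hpb
  · -- A drops f: B's fold is some b with len b = len f
    rcases hcase : array.foldl (pvStepB rec) none with _ | b
    · exfalso
      rcases hBnone hcase with ⟨_, hno⟩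
      have hfc : f ∈ cands := (hmem f).mp hf
      rcases List.mem_map.mp hfc with ⟨g, hg, he⟩
      have hb := hno g hg
      rw [he] at hb
      rw [hb] at hpf
      exact Bool.false_ne_true hpf
    · rcases hBsome b hcase with ⟨hpb, hmemb, hBmax, _⟩
      have hbs : b ∈ s := by
        rcases hmemb with h | h
        · cases h
        · exact (hmem b).mpr h
      have h1 : PySem.Str.len b ≤ PySem.Str.len f := hAmax b hbs hpb
      have h2 : PySem.Str.len f ≤ PySem.Str.len b := by
        have hfc : f ∈ cands := (hmem f).mp hf
        rcases List.mem_map.mp hfc with ⟨g, hg, he⟩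
        have hb := hBmax g hg (by rw [he]; exact hpf)
        rw [he] at hb
        exact hb
      have hlen : PySem.Str.len f = PySem.Str.len b := le_antisymm h2 h1
      rw [hAres, hlen]
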